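-- pv_equiv track=rewrite | github.com/hrothman/Programming-Tutorials | main.py | hahaha
-- ===== SOURCE A (Python) =====
-- def hahaha(str):
--     wasH = True
--     wasA = True
--     str2 = ""
--     counter = 0
--     for u in str:
--         if u == 'H' and wasA:
--             wasA = False
--             wasH = True
--         elif u == 'A' and wasH:
--             wasH = False
--             wasA = True
--         else:
--             return counter, counter == len(str), str2
--         str2 += u
--         counter += 1 #this is the same as counter = counter + 1
--     return counter, counter == len(str), str2
-- ===== SOURCE B (Python) =====
-- def hahaha(str):
--     if not str:
--         return 0, True, ""
--     if str[0] == 'H':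
--         pat = "HA"
--     elif str[0] == 'A':
--         pat = "AH"
--     else:
--         return 0, False, ""
--     counter = 0
--     for i, u in enumerate(str):
--         if u == pat[i % 2]:
--             counter += 1
--         else:
--             break
--     return counter, counter == len(str), str[:counter]
-- ===== Notes on version B (the rewrite author's own statement) =====
-- stated objective: alternative
-- what changed: B determines the expected alternating pattern from the first character and validates by positional parity comparison against pat[i % 2], instead of A's two running boolean flags updated inside the loop; the prefix is taken as a slice at the end rather than accumulated character by character.
import Mathlib
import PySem

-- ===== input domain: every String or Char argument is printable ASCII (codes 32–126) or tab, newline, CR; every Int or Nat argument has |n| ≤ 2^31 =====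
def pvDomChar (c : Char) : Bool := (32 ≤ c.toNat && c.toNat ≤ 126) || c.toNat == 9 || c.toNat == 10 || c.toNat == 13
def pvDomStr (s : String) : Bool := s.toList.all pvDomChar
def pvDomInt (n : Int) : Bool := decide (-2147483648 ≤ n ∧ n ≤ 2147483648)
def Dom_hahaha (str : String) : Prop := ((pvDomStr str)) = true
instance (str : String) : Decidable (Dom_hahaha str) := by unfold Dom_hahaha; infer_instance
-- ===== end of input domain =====

-- B validates against the alternating pattern chosen from the first character (pat[i % 2]) instead of A's two running boolean flags; alternative decomposition, same cost.

-- ===== PORT A =====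
-- A's for-loop with early return; str2 is accumulated as a List Char (Python string concatenation).
def hahahaLoop (len : Int) (rest : List Char) (wasH wasA : Bool) (str2 : List Char) (counter : Int) : Int × Bool × String :=
  match rest with
  | [] => (counter, counter == len, String.mk str2)
  | u :: t =>
    if u = 'H' ∧ wasA then hahahaLoop len t true false (str2 ++ [u]) (counter + 1)
    else if u = 'A' ∧ wasH then hahahaLoop len t false true (str2 ++ [u]) (counter + 1)
    else (counter, counter == len, String.mk str2)

def hahaha (str : String) : Int × Bool × String :=
  hahahaLoop (Int.ofNat str.length) str.toList true true [] 0

-- ===== PORT B =====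
-- B's counting loop: u == pat[i % 2] increments, the first mismatch breaks.
def altCount (pat0 pat1 : Char) (i : Nat) (rest : List Char) : Nat :=
  match rest with
  | [] => 0
  | u :: t => if u = (if i % 2 = 0 then pat0 else pat1) then altCount pat0 pat1 (i + 1) t + 1 else 0

def hahaha_alt (str : String) : Int × Bool × String :=
  match str.toList with
  | [] => (0, true, "")
  | c :: _ =>
    if c = 'H' then
      let k := altCount 'H' 'A' 0 str.toList
      ((k : Int), (k : Int) == Int.ofNat str.length, String.mk (str.toList.take k))
    else if c = 'A' then
      let k := altCount 'A' 'H' 0 str.toList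
      ((k : Int), (k : Int) == Int.ofNat str.length, String.mk (str.toList.take k))
    else (0, false, "")

-- ===== PRECONDITION & SPEC =====
def Spec_hahaha (str : String) (out : Int × Bool × String) : Prop := out = hahaha_alt str
instance (str : String) (out : Int × Bool × String) : Decidable (Spec_hahaha str out) := by unfold Spec_hahaha; infer_instance

-- ===== CLAIM (what is proved, stated in full; the proofs are below) =====
def Claim_equal_hahaha : Prop := ∀ (str : String), Dom_hahaha str → Spec_hahaha str (hahaha str)

-- ===== LEMMAS AND PROOFS =====

-- Swap formulation of B's counter: expected char e, other char o, roles swap each step.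
def cnt (e o : Char) (l : List Char) : Nat :=
  match l with
  | [] => 0
  | u :: t => if u = e then cnt o e t + 1 else 0

-- Bridge: the parity-indexed count equals the swap count started at the expected char for index i.
lemma altCount_eq_cnt (p0 p1 : Char) :
    ∀ (l : List Char) (i : Nat),
      altCount p0 p1 i l = cnt (if i % 2 = 0 then p0 else p1) (if i % 2 = 0 then p1 else p0) l := by
  intro l
  induction l with
  | nil => intro i; simp [altCount, cnt]
  | cons u t ih =>
    intro i
    have h : (i + 1) % 2 = 1 - i % 2 := by omega
    rcases Nat.mod_two_eq_zero_or_one i with hi | hi <;>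
      simp [altCount, cnt, hi, ih (i + 1), h]

-- A's flag state (wasH, wasA) = (e = 'A', e = 'H') means "next expected char is e".
lemma loop_eq :
    ∀ (l : List Char) (e o : Char), (e = 'H' ∧ o = 'A') ∨ (e = 'A' ∧ o = 'H') →
    ∀ (str2 : List Char) (counter len : Int),
      hahahaLoop len l (decide (e = 'A')) (decide (e = 'H')) str2 counter
        = (counter + cnt e o l,
           (counter + cnt e o l) == len,
           String.mk (str2 ++ l.take (cnt e o l))) := by
  intro l
  induction l with
  | nil => intro e o _ str2 counter len; simp [hahahaLoop, cnt]
  | cons u t ih =>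
    intro e o hp str2 counter len
    rcases hp with ⟨he, ho⟩ | ⟨he, ho⟩ <;> subst he <;> subst ho
    · by_cases hu : u = 'H'
      · subst hu
        have hrec : hahahaLoop len t true false (str2 ++ ['H']) (counter + 1)
            = (counter + 1 + (cnt 'A' 'H' t : Int),
               (counter + 1 + (cnt 'A' 'H' t : Int)) == len,
               String.mk (str2 ++ ['H'] ++ t.take (cnt 'A' 'H' t))) :=
          ih 'A' 'H' (Or.inr ⟨rfl, rfl⟩) (str2 ++ ['H']) (counter + 1) len
        have hc : counter + 1 + (cnt 'A' 'H' t : Int) = counter + ((cnt 'A' 'H' t : Nat) + 1 : Nat) := by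
          push_cast; ring
        simp only [hahahaLoop, cnt]
        norm_num
        rw [hrec]
        have h1 : counter + 1 + (cnt 'A' 'H' t : Int) = counter + ((cnt 'A' 'H' t : Int) + 1) := by ring
        rw [h1]
        simp
      · have h1 : ¬ (u = 'H' ∧ true = true) := by simp [hu]
        have h2 : ¬ (u = 'A' ∧ false = true) := by simp
        simp [hahahaLoop, cnt, hu]
    · by_cases hu : u = 'A'
      · subst hu
        have hrec : hahahaLoop len t false true (str2 ++ ['A']) (counter + 1)
            = (counter + 1 + (cnt 'H' 'A' t : Int),
               (counter + 1 + (cnt 'H' 'A' t : Int)) == len,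
               String.mk (str2 ++ ['A'] ++ t.take (cnt 'H' 'A' t))) :=
          ih 'H' 'A' (Or.inl ⟨rfl, rfl⟩) (str2 ++ ['A']) (counter + 1) len
        have hc : counter + 1 + (cnt 'H' 'A' t : Int) = counter + ((cnt 'H' 'A' t : Nat) + 1 : Nat) := by
          push_cast; ring
        simp only [hahahaLoop, cnt]
        norm_num
        rw [hrec]
        have h1 : counter + 1 + (cnt 'H' 'A' t : Int) = counter + ((cnt 'H' 'A' t : Int) + 1) := by ring
        rw [h1]
        simp
      · simp [hahahaLoop, cnt, hu]

-- ===== VERDICT (by name: the statement is the Claim_ definition above) =====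
theorem hahaha_spec : Claim_equal_hahaha := by
  intro str _
  show hahaha str = hahaha_alt str
  unfold hahaha hahaha_alt
  have hlen : str.length = str.toList.length := String.length_toList.symm
  rcases h : str.toList with _ | ⟨c, t⟩
  · rw [h] at hlen
    simp only [hahahaLoop, hlen]
    rfl
  · rw [h] at hlen
    by_cases hcH : c = 'H'
    · subst hcH
      have hstep : hahahaLoop (Int.ofNat str.length) ('H' :: t) true true [] 0
          = hahahaLoop (Int.ofNat str.length) t true false ['H'] 1 := by
        simp [hahahaLoop]
      have hrec : hahahaLoop (Int.ofNat str.length) t true false ['H'] 1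
          = ((1 : Int) + (cnt 'A' 'H' t : Int),
             ((1 : Int) + (cnt 'A' 'H' t : Int)) == Int.ofNat str.length,
             String.mk (['H'] ++ t.take (cnt 'A' 'H' t))) :=
        loop_eq t 'A' 'H' (Or.inr ⟨rfl, rfl⟩) ['H'] 1 (Int.ofNat str.length)
      have hcount : altCount 'H' 'A' 0 ('H' :: t) = cnt 'A' 'H' t + 1 := by
        simp [altCount, altCount_eq_cnt 'H' 'A' t 1]
      have hk : ((cnt 'A' 'H' t + 1 : Nat) : Int) = 1 + (cnt 'A' 'H' t : Int) := by
        push_cast; ring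
      simp only [hstep, hrec, hcount, hk, List.take_succ_cons]
      rfl
    · by_cases hcA : c = 'A'
      · subst hcA
        have hstep : hahahaLoop (Int.ofNat str.length) ('A' :: t) true true [] 0
            = hahahaLoop (Int.ofNat str.length) t false true ['A'] 1 := by
          simp [hahahaLoop]
        have hrec : hahahaLoop (Int.ofNat str.length) t false true ['A'] 1
            = ((1 : Int) + (cnt 'H' 'A' t : Int),
               ((1 : Int) + (cnt 'H' 'A' t : Int)) == Int.ofNat str.length,
               String.mk (['A'] ++ t.take (cnt 'H' 'A' t))) :=
          loop_eq t 'H' 'A' (Or.inl ⟨rfl, rfl⟩) ['A'] 1 (Int.ofNat str.length)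
        have hcount : altCount 'A' 'H' 0 ('A' :: t) = cnt 'H' 'A' t + 1 := by
          simp [altCount, altCount_eq_cnt 'A' 'H' t 1]
        have hk : ((cnt 'H' 'A' t + 1 : Nat) : Int) = 1 + (cnt 'H' 'A' t : Int) := by
          push_cast; ring
        simp only [hstep, hrec, hcount, hk, List.take_succ_cons, if_neg hcH]
        rfl
      · simp [hahahaLoop, hcH, hcA]
        refine ⟨?_, rfl⟩
        rw [hlen]
        simp only [List.length_cons]
        push_cast
        omega
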